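-- pv_equiv track=rewrite | github.com/ibalram/Programming-Library | interview/clootrack assignment.py | solve
-- ===== SOURCE A (Python) =====
-- def solve(tweets):
--     result = []
--     mapp = dict()
--     for user_name, tweet in tweets:
--         mapp[user_name] = mapp.get(user_name, 0) + 1
--     max_count = max(mapp.values())
--     for user_name in sorted(mapp.keys()):
--         if mapp[user_name] == max_count:
--             result.append((user_name, max_count))
--     return result
-- ===== SOURCE B (Python) =====
-- def solve(tweets):
--     counts = {}
--     for user_name, tweet in tweets:
--         counts[user_name] = counts.get(user_name, 0) + 1
--     buckets = {}
--     for user_name, c in counts.items():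
--         buckets.setdefault(c, []).append(user_name)
--     top = max(buckets.keys())
--     return [(name, top) for name in sorted(buckets[top])]
-- ===== Notes on version B (the rewrite author's own statement) =====
-- stated objective: alternative
-- what changed: B replaces A's pass that sorts all user names and filters each against the max count with an inverted index grouping names by count, then sorts only the top bucket.
import Mathlib
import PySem

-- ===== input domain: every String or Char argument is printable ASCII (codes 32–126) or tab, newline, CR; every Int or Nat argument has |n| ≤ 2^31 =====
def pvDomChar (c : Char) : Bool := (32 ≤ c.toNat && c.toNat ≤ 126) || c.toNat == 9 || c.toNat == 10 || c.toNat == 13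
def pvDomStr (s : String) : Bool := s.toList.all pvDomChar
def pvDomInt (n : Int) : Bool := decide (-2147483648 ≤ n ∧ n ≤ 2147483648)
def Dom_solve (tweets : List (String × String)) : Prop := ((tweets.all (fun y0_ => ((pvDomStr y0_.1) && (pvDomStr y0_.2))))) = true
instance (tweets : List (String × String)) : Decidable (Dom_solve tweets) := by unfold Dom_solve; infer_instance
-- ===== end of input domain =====

-- B groups user names into buckets keyed by their tweet count and sorts only the
-- bucket of the maximal count, instead of A's filter over all sorted names (alternative decomposition).

-- ===== PORT A =====
-- mapp[user_name] in A's second loop is ported as getD _ 0: the key is always present there.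
def solve (tweets : List (String × String)) : List (String × Int) :=
  let mapp := tweets.foldl (fun d p => d.insert p.1 (d.getD p.1 0 + 1))
    (PySem.Dict.empty : PySem.Dict String Int)
  match PySem.List.max? mapp.values (fun v => v) with
  | none => []  -- Python: max() of empty values raises ValueError; excluded by Pre_solve
  | some maxCount =>
    (PySem.List.sorted mapp.keys (fun k => k) false).foldl
      (fun acc k => if mapp.getD k 0 == maxCount then acc ++ [(k, maxCount)] else acc) []

-- ===== PORT B =====
def solve_alt (tweets : List (String × String)) : List (String × Int) :=
  let counts := tweets.foldl (fun d p => d.insert p.1 (d.getD p.1 0 + 1))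
    (PySem.Dict.empty : PySem.Dict String Int)
  let buckets := counts.items.foldl (fun d p => d.modify p.2 [] (fun l => l ++ [p.1]))
    (PySem.Dict.empty : PySem.Dict Int (List String))
  match PySem.List.max? buckets.keys (fun v => v) with
  | none => []  -- Python: max() of empty keys raises ValueError; excluded by Pre_solve
  | some top =>
    (PySem.List.sorted (buckets.getD top []) (fun n => n) false).map (fun n => (n, top))

-- ===== PRECONDITION & SPEC =====
-- On tweets = [] both A and B raise ValueError (max of an empty sequence); Pre_ excludes exactly that.
def Pre_solve (tweets : List (String × String)) : Prop := tweets ≠ []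
instance (tweets : List (String × String)) : Decidable (Pre_solve tweets) := by unfold Pre_solve; infer_instance
def pvWitness_solve : (List (String × String)) := [("alice", "hi"), ("bob", "yo"), ("alice", "x")]
def Spec_solve (tweets : List (String × String)) (out : List (String × Int)) : Prop := out = solve_alt tweets
instance (tweets : List (String × String)) (out : List (String × Int)) : Decidable (Spec_solve tweets out) := by unfold Spec_solve; infer_instance

-- ===== CLAIM (what is proved, stated in full; the proofs are below) =====
def Claim_equal_solve : Prop := ∀ (tweets : List (String × String)), Dom_solve tweets → Pre_solve tweets → Spec_solve tweets (solve tweets)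

-- ===== LEMMAS AND PROOFS =====

theorem solve_eq (tweets : List (String × String)) (h : tweets ≠ []) :
    solve tweets = solve_alt tweets := by
  simp only [solve, solve_alt]
  set mapp := tweets.foldl (fun d p => d.insert p.1 (d.getD p.1 0 + 1))
    (PySem.Dict.empty : PySem.Dict String Int) with hmapp
  set buckets := mapp.items.foldl (fun d p => d.modify p.2 [] (fun l => l ++ [p.1]))
    (PySem.Dict.empty : PySem.Dict Int (List String)) with hbuckets
  have hnd : mapp.keys.Nodup := by
    rw [hmapp]
    exact PySem.Dict.nodup_keys_foldl_insert_key tweets (fun p => p.1)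
      (fun d p => d.getD p.1 0 + 1) _ (by simp [PySem.Dict.keys_empty])
  have hkeys : mapp.keys = PySem.Set.ofList (tweets.map (fun p => p.1)) := by
    rw [hmapp, PySem.Dict.keys_foldl_insert_key, PySem.Dict.keys_empty,
        PySem.Set.ofList_eq_foldl]
    rfl
  have hkne : mapp.keys ≠ [] := by
    obtain ⟨t, ts, rfl⟩ := List.exists_cons_of_ne_nil h
    intro hk
    have : t.1 ∈ mapp.keys := by
      rw [hkeys]; exact (PySem.Set.mem_ofList _ _).mpr (by simp)
    simp [hk] at this
  have hvne : mapp.values ≠ [] := by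
    intro hv
    apply hkne
    have hi : mapp.items = [] := by
      simpa [PySem.Dict.values] using hv
    simp [PySem.Dict.keys, hi]
  obtain ⟨M, hM⟩ : ∃ M, PySem.List.max? mapp.values (fun v => v) = some M := by
    cases hx : PySem.List.max? mapp.values (fun v => v) with
    | none => exact absurd ((PySem.List.max?_eq_none_iff _ _).mp hx) hvne
    | some m => exact ⟨m, rfl⟩
  have hMmem : M ∈ mapp.values := PySem.List.max?_mem hM
  have hMmax : ∀ y ∈ mapp.values, y ≤ M := PySem.List.max?_isMax hM
  have hbkeys : buckets.keys = PySem.Set.ofList mapp.values := by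
    rw [hbuckets, PySem.Dict.keys_foldl_modify_key mapp.items (fun p => p.2) []
          (fun _ p => fun l => l ++ [p.1]), PySem.Dict.keys_empty,
        PySem.Set.ofList_eq_foldl]
    rfl
  have hbM : PySem.List.max? buckets.keys (fun v => v) = some M := by
    cases hx : PySem.List.max? buckets.keys (fun v => v) with
    | none =>
        rw [PySem.List.max?_eq_none_iff] at hx
        have : M ∈ buckets.keys := by
          rw [hbkeys]; exact (PySem.Set.mem_ofList _ _).mpr hMmem
        simp [hx] at this
    | some m =>
        have hmem : m ∈ mapp.values := by
          have := PySem.List.max?_mem hx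
          rw [hbkeys, PySem.Set.mem_ofList] at this
          exact this
        have h1 : m ≤ M := hMmax m hmem
        have h2 : M ≤ m := PySem.List.max?_isMax hx M
          (by rw [hbkeys]; exact (PySem.Set.mem_ofList _ _).mpr hMmem)
        exact congrArg some (le_antisymm h1 h2)
  have hswap : buckets = (mapp.items.map Prod.swap).foldl
      (fun d p => d.modify p.1 [] (fun l => l ++ [p.2])) PySem.Dict.empty := by
    rw [hbuckets, List.foldl_map]; rfl
  have hitems : mapp.items = mapp.keys.map (fun k => (k, mapp.getD k 0)) :=
    PySem.Dict.items_eq_map_keys mapp hnd 0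
  have hb : buckets.getD M [] = mapp.keys.filter (fun k => mapp.getD k 0 == M) := by
    rw [hswap, PySem.Dict.getD_foldl_modify_append, PySem.Dict.getD_empty]
    rw [hitems]
    simp [List.filter_map, List.map_map, Function.comp_def]
  have hsorted : PySem.List.sorted (mapp.keys.filter (fun k => mapp.getD k 0 == M)) (fun n => n) false
      = (PySem.List.sorted mapp.keys (fun k => k) false).filter (fun k => mapp.getD k 0 == M) := by
    apply PySem.List.sorted_eq_of_perm_of_pairwise_lt
    · exact (PySem.List.sorted_perm mapp.keys (fun k => k) false).filter _
    · have hp : (PySem.List.sorted mapp.keys (fun k => k) false).Pairwise (· ≤ ·) :=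
        PySem.List.sorted_pairwise mapp.keys (fun k => k)
      have hnd2 : (PySem.List.sorted mapp.keys (fun k => k) false).Nodup :=
        ((PySem.List.sorted_perm mapp.keys (fun k => k) false).symm).nodup hnd
      exact ((hp.and hnd2).imp (fun hab => lt_of_le_of_ne hab.1 hab.2)).filter _
  rw [hM, hbM]
  show (PySem.List.sorted mapp.keys (fun k => k) false).foldl
      (fun acc k => if mapp.getD k 0 == M then acc ++ [(k, M)] else acc) []
    = (PySem.List.sorted (buckets.getD M []) (fun n => n) false).map (fun n => (n, M))
  rw [hb, hsorted, PySem.List.foldl_append_if (fun k => mapp.getD k 0 == M) (fun k => (k, M))]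
  simp

-- ===== VERDICT (by name: the statement is the Claim_ definition above) =====
theorem solve_spec : Claim_equal_solve := by
  intro tweets _ hpre
  unfold Spec_solve
  exact solve_eq tweets hpre
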